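-- pv_equiv track=rewrite | github.com/dldydrhkd/Problem-Solving | 프로그래머스/석유 시추.py | solution
-- ===== SOURCE A (Python) =====
-- from collections import deque
--
-- def solution(land):
--     answer = 0
--     n = len(land)
--     m = len(land[0])
--     visited = [[False for j in range(m)] for i in range(n)]
--     res = [0 for i in range(m+1)]
--     dx = [0,0,-1,1]
--     dy = [-1,1,0,0]
--     def check(x, y):
--         if 0 <= x and x < n and 0 <= y and y < m :
--             return True
--         return False
--     dq = deque()
--     def bfs(x,y):
--         visited[x][y] = True
--         dq.append((x,y))
--         min_y = y
--         max_y = y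
--         cnt = 0
--         while(dq):
--             now = dq.popleft()
--             a = now[0]
--             b = now[1]
--             min_y = min(min_y, b)
--             max_y = max(max_y, b)
--             cnt+=1
--             for i in range(4):
--                 nx = a + dx[i]
--                 ny = b + dy[i]
--                 if check(nx,ny) and land[nx][ny] and not visited[nx][ny]:
--                     visited[nx][ny] = True
--                     dq.append((nx,ny))
--         for i in range(min_y, max_y+1):
--             res[i]+=cnt
--
--     for i in range(n):
--         for j in range(m):
--             if not visited[i][j] and land[i][j]:
--                 bfs(i,j)
--     answer = max(res)
--     return answer
-- ===== SOURCE B (Python) =====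
-- def solution(land):
--     n = len(land)
--     m = len(land[0])
--     seen = set()
--     diff = [0] * (m + 2)
--     for si in range(n):
--         for sj in range(m):
--             if land[si][sj] and (si, sj) not in seen:
--                 # flood fill with an index-queue over a growing list
--                 seen.add((si, sj))
--                 comp = [(si, sj)]
--                 k = 0
--                 lo = hi = sj
--                 cnt = 0
--                 while k < len(comp):
--                     x, y = comp[k]
--                     k += 1
--                     if y < lo:
--                         lo = y
--                     if y > hi:
--                         hi = y
--                     cnt += 1
--                     for nx, ny in ((x, y - 1), (x, y + 1), (x - 1, y), (x + 1, y)):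
--                         if 0 <= nx < n and 0 <= ny < m and land[nx][ny] and (nx, ny) not in seen:
--                             seen.add((nx, ny))
--                             comp.append((nx, ny))
--                 # difference array: O(1) per component instead of O(span)
--                 diff[lo] += cnt
--                 diff[hi + 1] -= cnt
--     best = acc = 0
--     for d in diff[:m]:
--         acc += d
--         if acc > best:
--             best = acc
--     return best
-- ===== Notes on version B (the rewrite author's own statement) =====
-- stated objective: alternative
-- what changed: Replaces the deque-plus-boolean-matrix BFS and per-component O(span) column range-additions with a set-based flood fill over an index-queue list and a difference array finished by one prefix-sum scan (one O(1) update per component).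
import Mathlib
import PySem

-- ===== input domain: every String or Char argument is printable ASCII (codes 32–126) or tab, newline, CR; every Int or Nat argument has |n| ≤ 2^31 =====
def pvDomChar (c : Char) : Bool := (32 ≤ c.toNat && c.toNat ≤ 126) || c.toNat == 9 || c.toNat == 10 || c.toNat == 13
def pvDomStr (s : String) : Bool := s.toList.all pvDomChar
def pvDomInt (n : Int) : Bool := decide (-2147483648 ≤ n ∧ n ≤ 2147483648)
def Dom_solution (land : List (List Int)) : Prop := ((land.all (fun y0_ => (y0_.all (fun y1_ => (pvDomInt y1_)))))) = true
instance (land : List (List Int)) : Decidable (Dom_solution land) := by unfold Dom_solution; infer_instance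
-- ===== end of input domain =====

-- B (solution_alt) replaces A's deque+matrix BFS with a set-based flood fill over an
-- index-queue list, and the per-component column range-additions + max(res) with a
-- difference array finished by a single prefix-sum scan; same return value on Pre_.

-- ===== PORT A =====
-- land[x][y]; both Pythons read cells only under the same in-bounds guard, and Pre_
-- guarantees every guarded access is in range, so the default 0 is never produced there.
def pvCell (land : List (List Int)) (x y : Int) : Int :=
  PySem.List.pyGetD (PySem.List.pyGetD land x []) y 0

def pvCheck (n m x y : Int) : Bool :=
  decide (0 ≤ x) && decide (x < n) && decide (0 ≤ y) && decide (y < m)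

-- visited[x][y] (indices are in range at every use site, guarded by pvCheck / the loop bounds)
def pvVGet (v : List (List Bool)) (x y : Int) : Bool :=
  PySem.List.pyGetD (PySem.List.pyGetD v x []) y false

-- visited[x][y] = True
def pvVSet (v : List (List Bool)) (x y : Int) : List (List Bool) :=
  PySem.List.pySetD v x (PySem.List.pySetD (PySem.List.pyGetD v x []) y true)

-- the while-loop of bfs; fuel n*m+1 suffices (each iteration pops one element, and every
-- queued element was freshly marked visited). State: visited, dq, min_y, max_y, cnt.
def pvBfsA (land : List (List Int)) (n m : Int) :
    Nat → List (List Bool) → List (Int × Int) → Int → Int → Int →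
    List (List Bool) × Int × Int × Int
  | 0, vis, _, mi, ma, c => (vis, mi, ma, c)
  | fuel + 1, vis, dq, mi, ma, c =>
    match dq with
    | [] => (vis, mi, ma, c)
    | (a, b) :: rest =>
      let mi' := min mi b
      let ma' := max ma b
      let c' := c + 1
      -- for i in range(4): nx = a+dx[i]; ny = b+dy[i]  (dx,dy zipped into delta pairs)
      let st := ([((0 : Int), (-1 : Int)), (0, 1), (-1, 0), (1, 0)]).foldl
        (fun (st : List (List Bool) × List (Int × Int)) d =>
          let nx := a + d.1
          let ny := b + d.2
          if pvCheck n m nx ny && !(pvCell land nx ny == 0) && !(pvVGet st.1 nx ny)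
          then (pvVSet st.1 nx ny, st.2 ++ [(nx, ny)])
          else st) (vis, rest)
      pvBfsA land n m fuel st.1 st.2 mi' ma' c'

-- for i in range(min_y, max_y+1): res[i] += cnt
def pvResAdd (res : List Int) (mi ma c : Int) : List Int :=
  (PySem.List.pyRange mi (ma + 1) 1).foldl
    (fun r i => PySem.List.pySetD r i (PySem.List.pyGetD r i 0 + c)) res

def solution (land : List (List Int)) : Int :=
  let n : Int := land.length
  let m : Int := (PySem.List.pyGetD land 0 []).length
  let fuel : Nat := land.length * (PySem.List.pyGetD land 0 []).length + 1
  let init : List (List Bool) × List Int :=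
    (List.replicate land.length (List.replicate (PySem.List.pyGetD land 0 []).length false),
     List.replicate ((PySem.List.pyGetD land 0 []).length + 1) 0)
  let fin := (PySem.List.pyRange 0 n 1).foldl (fun st i =>
    (PySem.List.pyRange 0 m 1).foldl (fun (st : List (List Bool) × List Int) j =>
      if !(pvVGet st.1 i j) && !(pvCell land i j == 0) then
        -- bfs(i,j): mark start visited, dq = [(i,j)], then the while loop, then the res loop
        let vis0 := pvVSet st.1 i j
        let r := pvBfsA land n m fuel vis0 [(i, j)] j j 0
        (r.1, pvResAdd st.2 r.2.1 r.2.2.1 r.2.2.2)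
      else st) st) init
  -- max(res); res is nonempty (length m+1), so the default is never used
  (PySem.List.max? fin.2 (fun x => x)).getD 0

-- ===== PORT B =====
-- the while k < len(comp) loop; same fuel bound as A's BFS. State: seen, comp, k, lo, hi, cnt.
def pvFloodB (land : List (List Int)) (n m : Int) :
    Nat → PySem.Set (Int × Int) → List (Int × Int) → Nat → Int → Int → Int →
    PySem.Set (Int × Int) × Int × Int × Int
  | 0, seen, _, _, lo, hi, c => (seen, lo, hi, c)
  | fuel + 1, seen, comp, k, lo, hi, c =>
    if k < comp.length then
      let p := comp.getD k (0, 0)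
      let x := p.1
      let y := p.2
      let lo' := if y < lo then y else lo
      let hi' := if y > hi then y else hi
      let st := ([(x, y - 1), (x, y + 1), (x - 1, y), (x + 1, y)]).foldl
        (fun (st : PySem.Set (Int × Int) × List (Int × Int)) q =>
          if (decide (0 ≤ q.1) && decide (q.1 < n) && decide (0 ≤ q.2) && decide (q.2 < m))
             && !(pvCell land q.1 q.2 == 0) && !(PySem.Set.contains st.1 q)
          then (PySem.Set.add st.1 q, st.2 ++ [q])
          else st) (seen, comp)
      pvFloodB land n m fuel st.1 st.2 (k + 1) lo' hi' (c + 1)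
    else (seen, lo, hi, c)

def solution_alt (land : List (List Int)) : Int :=
  let n : Int := land.length
  let m : Int := (PySem.List.pyGetD land 0 []).length
  let fuel : Nat := land.length * (PySem.List.pyGetD land 0 []).length + 1
  let init : PySem.Set (Int × Int) × List Int :=
    (PySem.Set.empty, List.replicate ((PySem.List.pyGetD land 0 []).length + 2) 0)
  let fin := (PySem.List.pyRange 0 n 1).foldl (fun st si =>
    (PySem.List.pyRange 0 m 1).foldl (fun (st : PySem.Set (Int × Int) × List Int) sj =>
      if !(pvCell land si sj == 0) && !(PySem.Set.contains st.1 (si, sj)) then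
        let r := pvFloodB land n m fuel (PySem.Set.add st.1 (si, sj)) [(si, sj)] 0 sj sj 0
        -- diff[lo] += cnt; diff[hi+1] -= cnt
        let d1 := PySem.List.pySetD st.2 r.2.1 (PySem.List.pyGetD st.2 r.2.1 0 + r.2.2.2)
        let d2 := PySem.List.pySetD d1 (r.2.2.1 + 1) (PySem.List.pyGetD d1 (r.2.2.1 + 1) 0 - r.2.2.2)
        (r.1, d2)
      else st) st) init
  -- best = acc = 0; for d in diff[:m]: acc += d; best = max(best, acc)
  let sc := (fin.2.take (PySem.List.pyGetD land 0 []).length).foldl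
    (fun (ab : Int × Int) d =>
      let acc := ab.1 + d
      (acc, if acc > ab.2 then acc else ab.2)) (0, 0)
  sc.2

-- ===== PRECONDITION & SPEC =====
-- Pre_ excludes exactly the inputs where Python A raises (IndexError): the empty grid
-- (land[0]) and ragged grids with some row shorter than row 0 (land[x][y] with y < m).
def Pre_solution (land : List (List Int)) : Prop :=
  land ≠ [] ∧ ∀ row ∈ land, (land.headD []).length ≤ row.length
instance (land : List (List Int)) : Decidable (Pre_solution land) := by
  unfold Pre_solution; infer_instance

def pvWitness_solution : List (List Int) := [[1, 0, 1], [1, 0, 0]]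

def Spec_solution (land : List (List Int)) (out : Int) : Prop := out = solution_alt land
instance (land : List (List Int)) (out : Int) : Decidable (Spec_solution land out) := by
  unfold Spec_solution; infer_instance

-- ===== CLAIM (what is proved, stated in full; the proofs are below) =====
def Claim_equal_solution : Prop :=
  ∀ (land : List (List Int)), Dom_solution land → Pre_solution land →
    Spec_solution land (solution land)

-- ===== LEMMAS AND PROOFS =====

-- column count (len(land[0]) for nonempty land)
def pvM (land : List (List Int)) : Nat := (land.headD []).length

-- the visited matrix has the grid's dimensions
def pvShape (land : List (List Int)) (vis : List (List Bool)) : Prop :=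
  vis.length = land.length ∧ ∀ row ∈ vis, row.length = pvM land

-- A's visited matrix and B's seen set agree on every in-range cell
def pvRel (land : List (List Int)) (vis : List (List Bool))
    (seen : PySem.Set (Int × Int)) : Prop :=
  ∀ x y : Int, 0 ≤ x → x < (land.length : Int) → 0 ≤ y → y < ((pvM land : Nat) : Int) →
    pvVGet vis x y = PySem.Set.contains seen (x, y)

def pvGood (land : List (List Int)) (p : Int × Int) : Prop :=
  0 ≤ p.1 ∧ p.1 < (land.length : Int) ∧ 0 ≤ p.2 ∧ p.2 < ((pvM land : Nat) : Int)

-- A's res array is the prefix-sum view of B's diff array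
def pvInv (mN : Nat) (res diff : List Int) : Prop :=
  res.length = mN + 1 ∧ diff.length = mN + 2 ∧ (diff.take (mN + 1)).sum = 0 ∧
  ∀ j : Nat, j ≤ mN → res.getD j 0 = (diff.take (j + 1)).sum

def pvSums : List Int → Int → List Int
  | [], _ => []
  | d :: l, a => (a + d) :: pvSums l (a + d)

lemma pvGetD_int {α : Type} (xs : List α) (i : Int) (d : α) (h : 0 ≤ i) :
    PySem.List.pyGetD xs i d = xs.getD i.toNat d := by
  simp [PySem.List.pyGetD, PySem.List.pyGet?_of_nonneg xs h, List.getD]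

lemma pvHeadM (land : List (List Int)) :
    (PySem.List.pyGetD land 0 []).length = pvM land := by
  rw [pvGetD_int land 0 [] le_rfl]
  cases land <;> rfl

lemma pvContains_add (s : PySem.Set (Int × Int)) (p q : Int × Int) :
    PySem.Set.contains (PySem.Set.add s p) q = (p == q || PySem.Set.contains s q) := by
  rw [Bool.eq_iff_iff]
  simp only [Bool.or_eq_true, beq_iff_eq, PySem.Set.contains_iff, PySem.Set.mem_add]
  tauto

lemma pvGetD_set_self {α : Type} (l : List α) (i : Nat) (v d : α) (h : i < l.length) :
    (l.set i v).getD i d = v := by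
  simp [List.getD, h]

lemma pvGetD_set_ne {α : Type} (l : List α) (i j : Nat) (v d : α) (h : i ≠ j) :
    (l.set i v).getD j d = l.getD j d := by
  simp [List.getD, h]

lemma pvCheck_true_iff (n m x y : Int) :
    pvCheck n m x y = true ↔ 0 ≤ x ∧ x < n ∧ 0 ≤ y ∧ y < m := by
  simp [pvCheck]
  tauto

lemma pvVGet_nonneg (v : List (List Bool)) (x y : Int) (hx : 0 ≤ x) (hy : 0 ≤ y) :
    pvVGet v x y = (v.getD x.toNat []).getD y.toNat false := by
  unfold pvVGet
  rw [pvGetD_int v x [] hx, pvGetD_int _ y false hy]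

lemma pvVSet_nonneg (v : List (List Bool)) (x y : Int) (hx : 0 ≤ x) (hy : 0 ≤ y) :
    pvVSet v x y = v.set x.toNat ((v.getD x.toNat []).set y.toNat true) := by
  unfold pvVSet
  rw [pvGetD_int v x [] hx, PySem.List.pySetD_of_nonneg _ _ hy, PySem.List.pySetD_of_nonneg _ _ hx]

lemma pvShape_set (land : List (List Int)) (vis : List (List Bool)) (hS : pvShape land vis)
    (x y : Int) (hx : 0 ≤ x) (hxn : x < (land.length : Int)) (hy : 0 ≤ y) :
    pvShape land (pvVSet vis x y) := by
  obtain ⟨hlen, hrow⟩ := hS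
  have hxl : x.toNat < vis.length := by omega
  rw [pvVSet_nonneg vis x y hx hy]
  refine ⟨by simpa using hlen, ?_⟩
  intro row hr
  rcases List.mem_or_eq_of_mem_set hr with h | h
  · exact hrow row h
  · subst h
    rw [List.length_set, List.getD_eq_getElem _ _ hxl]
    exact hrow _ (List.getElem_mem hxl)

lemma pvVGet_set (land : List (List Int)) (vis : List (List Bool)) (hS : pvShape land vis)
    (x y x' y' : Int) (hx : 0 ≤ x) (hxn : x < (land.length : Int)) (hy : 0 ≤ y)
    (hym : y < ((pvM land : Nat) : Int)) (hx' : 0 ≤ x') (hy' : 0 ≤ y') :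
    pvVGet (pvVSet vis x y) x' y' = if x' = x ∧ y' = y then true else pvVGet vis x' y' := by
  obtain ⟨hlen, hrow⟩ := hS
  have hxl : x.toNat < vis.length := by omega
  have hrl : (vis.getD x.toNat []).length = pvM land := by
    rw [List.getD_eq_getElem _ _ hxl]
    exact hrow _ (List.getElem_mem hxl)
  rw [pvVSet_nonneg vis x y hx hy, pvVGet_nonneg _ _ _ hx' hy', pvVGet_nonneg _ _ _ hx' hy']
  by_cases hxx : x' = x
  · subst hxx
    rw [pvGetD_set_self _ _ _ _ hxl]
    by_cases hyy : y' = y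
    · subst hyy
      rw [pvGetD_set_self _ _ _ _ (by omega)]
      simp
    · rw [pvGetD_set_ne _ _ _ _ _ (by omega)]
      simp [hyy]
  · rw [pvGetD_set_ne _ _ _ _ _ (by omega)]
    simp [hxx]

lemma pvRel_set (land : List (List Int)) (vis : List (List Bool)) (seen : PySem.Set (Int × Int))
    (hS : pvShape land vis) (hR : pvRel land vis seen) (x y : Int)
    (hx : 0 ≤ x) (hxn : x < (land.length : Int)) (hy : 0 ≤ y)
    (hym : y < ((pvM land : Nat) : Int)) :
    pvRel land (pvVSet vis x y) (PySem.Set.add seen (x, y)) := by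
  intro x' y' hx' hxn' hy' hym'
  rw [pvVGet_set land vis hS x y x' y' hx hxn hy hym hx' hy', pvContains_add]
  by_cases h : x' = x ∧ y' = y
  · obtain ⟨h1, h2⟩ := h
    subst h1; subst h2
    simp
  · rw [if_neg h, hR x' y' hx' hxn' hy' hym']
    have : ¬ ((x, y) == (x', y')) = true := by
      simp only [beq_iff_eq, Prod.mk.injEq]
      tauto
    simp [Bool.eq_false_iff.mpr this]

-- relation between the two neighbour-fold states: A's queue is B's comp from index j on
def pvFoldRel (land : List (List Int)) (j : Nat)
    (A : List (List Bool) × List (Int × Int)) (B : PySem.Set (Int × Int) × List (Int × Int)) : Prop :=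
  pvShape land A.1 ∧ pvRel land A.1 B.1 ∧ A.2 = B.2.drop j ∧ j ≤ B.2.length ∧
  ∀ p ∈ B.2, pvGood land p

lemma pvFold_lockstep (land : List (List Int)) (a b : Int) (D : List (Int × Int)) :
    ∀ (vis : List (List Bool)) (seen : PySem.Set (Int × Int)) (q comp : List (Int × Int)) (j : Nat),
    pvShape land vis → pvRel land vis seen → q = comp.drop j → j ≤ comp.length →
    (∀ p ∈ comp, pvGood land p) →
    pvFoldRel land j
      (D.foldl
        (fun (st : List (List Bool) × List (Int × Int)) d =>
          let nx := a + d.1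
          let ny := b + d.2
          if pvCheck (land.length : Int) ((pvM land : Nat) : Int) nx ny &&
              !(pvCell land nx ny == 0) && !(pvVGet st.1 nx ny)
          then (pvVSet st.1 nx ny, st.2 ++ [(nx, ny)])
          else st) (vis, q))
      ((D.map (fun d => (a + d.1, b + d.2))).foldl
        (fun (st : PySem.Set (Int × Int) × List (Int × Int)) p =>
          if (decide (0 ≤ p.1) && decide (p.1 < (land.length : Int)) && decide (0 ≤ p.2) &&
              decide (p.2 < ((pvM land : Nat) : Int))) &&
              !(pvCell land p.1 p.2 == 0) && !(PySem.Set.contains st.1 p)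
          then (PySem.Set.add st.1 p, st.2 ++ [p])
          else st) (seen, comp)) := by
  induction D with
  | nil =>
      intro vis seen q comp j hS hR hq hj hc
      exact ⟨hS, hR, hq, hj, hc⟩
  | cons d D ih =>
      intro vis seen q comp j hS hR hq hj hc
      simp only [List.map_cons, List.foldl_cons]
      have hchain : ∀ x y : Int,
          (decide (0 ≤ x) && decide (x < (land.length : Int)) && decide (0 ≤ y) &&
            decide (y < ((pvM land : Nat) : Int)))
          = pvCheck (land.length : Int) ((pvM land : Nat) : Int) x y := fun _ _ => rfl
      simp only [hchain]
      have hcond : (pvCheck (land.length : Int) ((pvM land : Nat) : Int) (a + d.1) (b + d.2) &&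
            !(pvCell land (a + d.1) (b + d.2) == 0) && !(pvVGet vis (a + d.1) (b + d.2)))
          = (pvCheck (land.length : Int) ((pvM land : Nat) : Int) (a + d.1) (b + d.2) &&
            !(pvCell land (a + d.1) (b + d.2) == 0) &&
            !(PySem.Set.contains seen (a + d.1, b + d.2))) := by
        by_cases hchk : pvCheck (land.length : Int) ((pvM land : Nat) : Int) (a + d.1) (b + d.2)
            = true
        · obtain ⟨h1, h2, h3, h4⟩ := (pvCheck_true_iff _ _ _ _).mp hchk
          rw [hR _ _ h1 h2 h3 h4]
        · rw [Bool.eq_false_iff.mpr hchk]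
          simp
      rw [hcond]
      by_cases hg : (pvCheck (land.length : Int) ((pvM land : Nat) : Int) (a + d.1) (b + d.2) &&
            !(pvCell land (a + d.1) (b + d.2) == 0) &&
            !(PySem.Set.contains seen (a + d.1, b + d.2))) = true
      · rw [if_pos hg, if_pos hg]
        obtain ⟨hcb, _⟩ := Bool.and_eq_true_iff.mp (Bool.and_eq_true_iff.mp hg).1
        obtain ⟨h1, h2, h3, h4⟩ := (pvCheck_true_iff _ _ _ _).mp hcb
        refine ih (pvVSet vis (a + d.1) (b + d.2)) (PySem.Set.add seen (a + d.1, b + d.2))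
          (q ++ [(a + d.1, b + d.2)]) (comp ++ [(a + d.1, b + d.2)]) j
          (pvShape_set land vis hS _ _ h1 h2 h3)
          (pvRel_set land vis seen hS hR _ _ h1 h2 h3 h4) ?_ ?_ ?_
        · rw [hq, List.drop_append_of_le_length hj]
        · rw [List.length_append]
          omega
        · intro p hp
          rcases List.mem_append.mp hp with h | h
          · exact hc p h
          · rw [List.mem_singleton.mp h]
            exact ⟨h1, h2, h3, h4⟩
      · rw [if_neg hg, if_neg hg]
        exact ih vis seen q comp j hS hR hq hj hc

-- lockstep relation between the two BFS results
def pvBfsRel (land : List (List Int)) (A : List (List Bool) × Int × Int × Int)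
    (B : PySem.Set (Int × Int) × Int × Int × Int) : Prop :=
  pvShape land A.1 ∧ pvRel land A.1 B.1 ∧ A.2.1 = B.2.1 ∧ A.2.2.1 = B.2.2.1 ∧
  A.2.2.2 = B.2.2.2 ∧ 0 ≤ A.2.1 ∧ A.2.1 ≤ A.2.2.1 ∧ A.2.2.1 < ((pvM land : Nat) : Int)

lemma pvBfs_lockstep (land : List (List Int)) :
    ∀ (fuel : Nat) (vis : List (List Bool)) (seen : PySem.Set (Int × Int))
      (comp : List (Int × Int)) (k : Nat) (mi ma c : Int),
    pvShape land vis → pvRel land vis seen → k ≤ comp.length →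
    (∀ p ∈ comp, pvGood land p) → 0 ≤ mi → mi ≤ ma → ma < ((pvM land : Nat) : Int) →
    pvBfsRel land
      (pvBfsA land (land.length : Int) ((pvM land : Nat) : Int) fuel vis (comp.drop k) mi ma c)
      (pvFloodB land (land.length : Int) ((pvM land : Nat) : Int) fuel seen comp k mi ma c) := by
  intro fuel
  induction fuel with
  | zero =>
      intro vis seen comp k mi ma c hS hR hk hcomp hmi0 hmima hmam
      exact ⟨hS, hR, rfl, rfl, rfl, hmi0, hmima, hmam⟩
  | succ fuel ih =>
      intro vis seen comp k mi ma c hS hR hk hcomp hmi0 hmima hmam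
      by_cases hkl : k < comp.length
      · have hdrop : comp.drop k = comp[k] :: comp.drop (k + 1) := List.drop_eq_getElem_cons hkl
        rcases hab : comp[k] with ⟨a, b⟩
        have hgood : pvGood land (a, b) := by
          rw [← hab]
          exact hcomp _ (List.getElem_mem hkl)
        obtain ⟨ha0, han, hb0, hbm⟩ := hgood
        rw [hdrop, hab]
        simp only [pvBfsA, pvFloodB, if_pos hkl, List.getD_eq_getElem comp (0, 0) hkl, hab]
        have hmap : [(a, b - 1), (a, b + 1), (a - 1, b), (a + 1, b)]
            = ([((0 : Int), (-1 : Int)), (0, 1), (-1, 0), (1, 0)]).map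
                (fun d => (a + d.1, b + d.2)) := by
          norm_num
          omega
        rw [hmap]
        have hfold := pvFold_lockstep land a b [((0 : Int), (-1 : Int)), (0, 1), (-1, 0), (1, 0)]
          vis seen (comp.drop (k + 1)) comp (k + 1) hS hR rfl (by omega) hcomp
        obtain ⟨fS, fR, fq, fj, fgood⟩ := hfold
        have hminv : (if b < mi then b else mi) = min mi b := by
          rw [min_def]
          split_ifs <;> omega
        have hmaxv : (if b > ma then b else ma) = max ma b := by
          rw [max_def]
          split_ifs <;> omega
        rw [hminv, hmaxv, fq]
        exact ih _ _ _ _ (min mi b) (max ma b) (c + 1) fS fR fj fgood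
          (le_min hmi0 hb0) (le_trans (min_le_left _ _) (le_trans hmima (le_max_left _ _))) (max_lt hmam hbm)
      · have hge : comp.length ≤ k := by omega
        rw [List.drop_eq_nil_of_le hge]
        simp only [pvBfsA, pvFloodB, if_neg hkl]
        exact ⟨hS, hR, rfl, rfl, rfl, hmi0, hmima, hmam⟩

lemma pvFoldSet_length (c : Int) (L : List Int) :
    ∀ res : List Int,
      (L.foldl (fun r i => PySem.List.pySetD r i (PySem.List.pyGetD r i 0 + c)) res).length
        = res.length := by
  induction L with
  | nil => intro res; rfl
  | cons i t ih =>
      intro res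
      rw [List.foldl_cons, ih]
      exact PySem.List.length_pySetD _ _ _

lemma pvResAdd_getD (c : Int) :
    ∀ (K : Nat) (a b : Int) (res : List Int), (b - a).toNat = K → 0 ≤ a →
      b ≤ (res.length : Int) → ∀ j : Nat,
      ((PySem.List.pyRange a b 1).foldl
        (fun r i => PySem.List.pySetD r i (PySem.List.pyGetD r i 0 + c)) res).getD j 0
      = res.getD j 0 + if a ≤ (j : Int) ∧ (j : Int) < b then c else 0 := by
  intro K
  induction K with
  | zero =>
      intro a b res hK ha hb j
      rw [PySem.List.pyRange_one_eq_nil (by omega)]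
      rw [if_neg (by omega)]
      simp
  | succ K ih =>
      intro a b res hK ha hb j
      have hab : a < b := by omega
      rw [PySem.List.pyRange_one_cons hab, List.foldl_cons]
      have hset : PySem.List.pySetD res a (PySem.List.pyGetD res a 0 + c)
          = res.set a.toNat (res.getD a.toNat 0 + c) := by
        rw [PySem.List.pySetD_of_nonneg _ _ ha, pvGetD_int _ _ _ ha]
      rw [hset]
      rw [ih (a + 1) b _ (by omega) (by omega) (by simpa using hb)]
      have hal : a.toNat < res.length := by omega
      by_cases hja : j = a.toNat
      · subst hja
        rw [pvGetD_set_self _ _ _ _ hal]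
        rw [if_neg (by omega), if_pos (by omega)]
        ring
      · rw [pvGetD_set_ne _ _ _ _ _ (by omega)]
        by_cases h1 : a + 1 ≤ (j : Int) ∧ (j : Int) < b
        · rw [if_pos h1, if_pos (by omega)]
        · rw [if_neg h1, if_neg (by omega)]

lemma pvSum_take_set (l : List Int) :
    ∀ (p t : Nat) (c : Int), p < l.length →
      ((l.set p (l.getD p 0 + c)).take t).sum = (l.take t).sum + if p < t then c else 0 := by
  induction l with
  | nil => intro p t c h; simp at h
  | cons x xs ih =>
      intro p t c h
      cases p with
      | zero =>
          cases t with
          | zero => simp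
          | succ t => simp [List.getD]; ring
      | succ p =>
          cases t with
          | zero => simp
          | succ t =>
              simp only [List.set_cons_succ, List.getD_cons_succ, List.take_succ_cons,
                List.sum_cons]
              rw [ih p t c (by simpa using h)]
              by_cases hpt : p < t
              · rw [if_pos hpt, if_pos (by omega : p + 1 < t + 1)]; ring
              · rw [if_neg hpt, if_neg (by omega : ¬ p + 1 < t + 1)]; ring

lemma pvInv_step (mN : Nat) (res diff : List Int) (h : pvInv mN res diff) (lo hi c : Int)
    (h0 : 0 ≤ lo) (hlh : lo ≤ hi) (hhm : hi < (mN : Int)) :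
    pvInv mN (pvResAdd res lo hi c)
      (PySem.List.pySetD (PySem.List.pySetD diff lo (PySem.List.pyGetD diff lo 0 + c)) (hi + 1)
        (PySem.List.pyGetD (PySem.List.pySetD diff lo (PySem.List.pyGetD diff lo 0 + c)) (hi + 1) 0
          - c)) := by
  obtain ⟨hr, hd, hz, hp⟩ := h
  have hlo : lo.toNat < diff.length := by omega
  have hset1 : PySem.List.pySetD diff lo (PySem.List.pyGetD diff lo 0 + c)
      = diff.set lo.toNat (diff.getD lo.toNat 0 + c) := by
    rw [PySem.List.pySetD_of_nonneg _ _ h0, pvGetD_int _ _ _ h0]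
  set d1 := diff.set lo.toNat (diff.getD lo.toNat 0 + c) with hd1
  have hd1len : d1.length = mN + 2 := by rw [hd1, List.length_set, hd]
  have hhi : (hi + 1).toNat < d1.length := by omega
  have hset2 : PySem.List.pySetD d1 (hi + 1) (PySem.List.pyGetD d1 (hi + 1) 0 - c)
      = d1.set (hi + 1).toNat (d1.getD (hi + 1).toNat 0 + (-c)) := by
    rw [PySem.List.pySetD_of_nonneg _ _ (by omega), pvGetD_int _ _ _ (by omega),
      sub_eq_add_neg]
  rw [hset1, hset2]
  set d2 := d1.set (hi + 1).toNat (d1.getD (hi + 1).toNat 0 + (-c)) with hd2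
  have hd2len : d2.length = mN + 2 := by rw [hd2, List.length_set, hd1len]
  have hsum : ∀ t : Nat, (d2.take t).sum
      = (diff.take t).sum + (if lo.toNat < t then c else 0) + (if (hi + 1).toNat < t then -c else 0) := by
    intro t
    rw [hd2, pvSum_take_set d1 _ _ _ hhi, hd1, pvSum_take_set diff _ _ _ hlo]
  have hral : (pvResAdd res lo hi c).length = res.length := by
    unfold pvResAdd
    exact pvFoldSet_length c _ res
  refine ⟨by rw [hral, hr], hd2len, ?_, ?_⟩
  · rw [hsum (mN + 1), hz, if_pos (by omega), if_pos (by omega)]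
    ring
  · intro j hj
    unfold pvResAdd
    rw [pvResAdd_getD c ((hi + 1) - lo).toNat lo (hi + 1) res rfl h0 (by omega) j]
    rw [hp j hj, hsum (j + 1)]
    by_cases h1 : lo ≤ (j : Int) ∧ (j : Int) < hi + 1
    · rw [if_pos h1, if_pos (by omega)]
      by_cases h2 : (hi + 1).toNat < j + 1
      · omega
      · rw [if_neg h2]; ring
    · rw [if_neg h1]
      by_cases h2 : lo.toNat < j + 1
      · rw [if_pos h2, if_pos (by omega)]
        ring
      · rw [if_neg h2, if_neg (by omega)]
        ring

lemma pvSums_length : ∀ (l : List Int) (a : Int), (pvSums l a).length = l.length := by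
  intro l
  induction l with
  | nil => intro a; rfl
  | cons d t ih => intro a; simp [pvSums, ih]

lemma pvSums_getD : ∀ (l : List Int) (a : Int) (j : Nat), j < l.length →
    (pvSums l a).getD j 0 = a + (l.take (j + 1)).sum := by
  intro l
  induction l with
  | nil => intro a j h; simp at h
  | cons d t ih =>
      intro a j h
      cases j with
      | zero => simp [pvSums]
      | succ j =>
          simp only [pvSums, List.getD_cons_succ, List.take_succ_cons, List.sum_cons]
          rw [ih (a + d) j (by simpa using h)]
          ring

lemma pvScan_eq : ∀ (l : List Int) (a b : Int),
    (l.foldl (fun (ab : Int × Int) d =>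
      let acc := ab.1 + d
      (acc, if acc > ab.2 then acc else ab.2)) (a, b)).2
    = (pvSums l a).foldl max b := by
  intro l
  induction l with
  | nil => intro a b; rfl
  | cons d t ih =>
      intro a b
      simp only [List.foldl_cons, pvSums]
      rw [ih]
      congr 1
      rw [max_def]
      split_ifs <;> omega

lemma pvFoldl_max_seed : ∀ (l : List Int) (a b : Int),
    l.foldl max (max a b) = max a (l.foldl max b) := by
  intro l
  induction l with
  | nil => intro a b; rfl
  | cons c t ih =>
      intro a b
      simp only [List.foldl_cons]
      rw [max_assoc, ih]

lemma pvFinal (mN : Nat) (res diff : List Int) (h : pvInv mN res diff) :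
    (PySem.List.max? res (fun x => x)).getD 0
    = ((diff.take mN).foldl (fun (ab : Int × Int) d =>
        let acc := ab.1 + d
        (acc, if acc > ab.2 then acc else ab.2)) (0, 0)).2 := by
  obtain ⟨hr, hd, hz, hp⟩ := h
  have hlenT : (diff.take mN).length = mN := by
    rw [List.length_take]
    omega
  have hSlen : (pvSums (diff.take mN) 0).length = mN := by
    rw [pvSums_length, hlenT]
  have hres : res = pvSums (diff.take mN) 0 ++ [0] := by
    apply List.ext_getElem
    · rw [hr, List.length_append, hSlen]
      rfl
    · intro j hj1 hj2
      have hj : j < mN + 1 := by omega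
      rw [← List.getD_eq_getElem res 0 hj1, ← List.getD_eq_getElem _ 0 hj2]
      by_cases hjm : j < mN
      · rw [List.getD_append _ _ _ _ (by omega), pvSums_getD _ _ _ (by omega), zero_add,
          List.take_take, hp j (by omega)]
        have hmin : min (j + 1) mN = j + 1 := by omega
        rw [hmin]
      · have hjm' : j = mN := by omega
        rw [hjm', hp mN le_rfl, hz, List.getD_append_right _ _ _ _ (by omega), hSlen]
        simp
  rw [pvScan_eq, hres]
  rcases hS : pvSums (diff.take mN) 0 with _ | ⟨s, S⟩
  · simp [PySem.List.max?]
  · rw [List.cons_append, PySem.List.max?_id_cons, Option.getD_some, List.foldl_append,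
      List.foldl_cons, List.foldl_nil]
    calc (S.foldl max s) ⊔ 0 = 0 ⊔ (S.foldl max s) := max_comm _ _
      _ = S.foldl max (0 ⊔ s) := (pvFoldl_max_seed S 0 s).symm
      

lemma pvFoldl_rel {α β γ : Type} (R : α → β → Prop) (f : α → γ → α) (g : β → γ → β) :
    ∀ (l : List γ) (a : α) (b : β), R a b →
      (∀ c ∈ l, ∀ a' b', R a' b' → R (f a' c) (g b' c)) →
      R (l.foldl f a) (l.foldl g b) := by
  intro l
  induction l with
  | nil => intro a b h _; exact h
  | cons c t ih =>
      intro a b h hstep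
      exact ih (f a c) (g b c) (hstep c (List.mem_cons_self) a b h)
        (fun c' hc' => hstep c' (List.mem_cons_of_mem _ hc'))


lemma pvGetD_replicate {α : Type} (n j : Nat) (c d : α) :
    (List.replicate n c).getD j d = if j < n then c else d := by
  by_cases h : j < n
  · rw [List.getD_eq_getElem _ _ (by simpa using h), List.getElem_replicate, if_pos h]
  · rw [List.getD_eq_default _ _ (by simpa using h), if_neg h]

lemma pvVGet_replicate (n m : Nat) (x y : Int) (hx : 0 ≤ x) (hy : 0 ≤ y) :
    pvVGet (List.replicate n (List.replicate m false)) x y = false := by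
  rw [pvVGet_nonneg _ _ _ hx hy, pvGetD_replicate]
  by_cases hxl : x.toNat < n
  · rw [if_pos hxl, pvGetD_replicate]
    split_ifs <;> rfl
  · rw [if_neg hxl]
    rfl

lemma pvInv_init (mN : Nat) :
    pvInv mN (List.replicate (mN + 1) 0) (List.replicate (mN + 2) 0) := by
  refine ⟨by simp, by simp, ?_, ?_⟩
  · rw [List.take_replicate]
    simp
  · intro j hj
    rw [List.take_replicate, pvGetD_replicate, if_pos (by omega : j < mN + 1)]
    simp

-- ===== VERDICT (by name: the statement is the Claim_ definition above) =====
theorem solution_spec : Claim_equal_solution := by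
  unfold Claim_equal_solution
  intro land hD hP
  unfold Spec_solution solution solution_alt
  simp only [pvHeadM]
  refine pvFinal (pvM land) _ _ ?_
  refine (pvFoldl_rel
    (fun (A : List (List Bool) × List Int) (B : PySem.Set (Int × Int) × List Int) =>
      pvShape land A.1 ∧ pvRel land A.1 B.1 ∧ pvInv (pvM land) A.2 B.2)
    _ _ _ _ _ ?_ ?_).2.2
  · refine ⟨⟨by simp, ?_⟩, ?_, pvInv_init (pvM land)⟩
    · intro row hr
      rw [List.eq_of_mem_replicate hr, List.length_replicate]
    · intro x y hx hxn hy hym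
      rw [pvVGet_replicate _ _ _ _ hx hy]
      simp [PySem.Set.contains, PySem.Set.empty]
  · intro i hi stA stB hRst
    have hib := PySem.List.mem_pyRange_one.mp hi
    refine pvFoldl_rel
      (fun (A : List (List Bool) × List Int) (B : PySem.Set (Int × Int) × List Int) =>
        pvShape land A.1 ∧ pvRel land A.1 B.1 ∧ pvInv (pvM land) A.2 B.2)
      _ _ _ stA stB hRst ?_
    intro j hj stA' stB' hR'
    obtain ⟨sh, rel, inv⟩ := hR'
    have hjb := PySem.List.mem_pyRange_one.mp hj
    have hvc : pvVGet stA'.1 i j = PySem.Set.contains stB'.1 (i, j) :=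
      rel i j hib.1 hib.2 hjb.1 hjb.2
    have hg : (!(pvVGet stA'.1 i j) && !(pvCell land i j == 0))
        = (!(pvCell land i j == 0) && !(PySem.Set.contains stB'.1 (i, j))) := by
      rw [hvc, Bool.and_comm]
    rw [hg]
    by_cases hgt : (!(pvCell land i j == 0) && !(PySem.Set.contains stB'.1 (i, j))) = true
    · rw [if_pos hgt, if_pos hgt]
      have hb := pvBfs_lockstep land (land.length * pvM land + 1)
        (pvVSet stA'.1 i j) (PySem.Set.add stB'.1 (i, j)) [(i, j)] 0 j j 0
        (pvShape_set land stA'.1 sh i j hib.1 hib.2 hjb.1)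
        (pvRel_set land stA'.1 stB'.1 sh rel i j hib.1 hib.2 hjb.1 hjb.2)
        (by simp) ?_ hjb.1 le_rfl hjb.2
      · rw [List.drop_zero] at hb
        obtain ⟨bS, bR, be1, be2, be3, bb1, bb2, bb3⟩ := hb
        refine ⟨bS, bR, ?_⟩
        rw [← be1, ← be2, ← be3]
        exact pvInv_step (pvM land) stA'.2 stB'.2 inv _ _ _ bb1 bb2 bb3
      · intro p hp
        rw [List.mem_singleton.mp hp]
        exact ⟨hib.1, hib.2, hjb.1, hjb.2⟩
    · rw [if_neg hgt, if_neg hgt]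
      exact ⟨sh, rel, inv⟩
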